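-- pv_equiv track=rewrite | github.com/mmarcos05/Guia3conMartu | Luli/parcialesPython/parcial_naciones.py | acomodar
-- ===== SOURCE A (Python) =====
-- def acomodar(s: list[str]) -> list[str]:
--     lista_up: list[str] = []
--     lista_lla: list[str] = []
--     lista_final: list[str] = []
--
--     for palabra in s:
--         if palabra == "UP":
--             lista_up.append("UP")
--         if palabra == "LLA":
--             lista_lla.append("LLA")
--
--     lista_final = lista_up + lista_lla
--     return lista_final
-- ===== SOURCE B (Python) =====
-- def acomodar(s: list[str]) -> list[str]:
--     relevantes = [p for p in s if p in ("UP", "LLA")]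
--     relevantes.sort(key=lambda p: p == "LLA")
--     return relevantes
-- ===== Notes on version B (the rewrite author's own statement) =====
-- stated objective: alternative
-- what changed: Instead of accumulating two bucket lists and concatenating them, B filters the relevant words and stably sorts them with a boolean key that orders UP before LLA.
import Mathlib
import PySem

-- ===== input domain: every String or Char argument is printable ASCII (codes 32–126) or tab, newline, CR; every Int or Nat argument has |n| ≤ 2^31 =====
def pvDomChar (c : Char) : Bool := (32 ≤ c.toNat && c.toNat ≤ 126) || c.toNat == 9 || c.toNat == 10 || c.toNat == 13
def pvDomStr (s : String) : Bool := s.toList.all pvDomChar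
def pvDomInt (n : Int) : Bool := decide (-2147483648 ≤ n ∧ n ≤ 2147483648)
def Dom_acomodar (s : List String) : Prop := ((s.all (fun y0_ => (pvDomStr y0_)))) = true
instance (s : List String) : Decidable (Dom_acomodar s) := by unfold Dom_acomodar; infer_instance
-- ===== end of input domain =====

-- B filters the relevant words and stably sorts them (UP before LLA) instead of accumulating two bucket lists (objective: alternative).

-- ===== PORT A =====
-- the loop accumulates (lista_up, lista_lla) by appending; then lista_final = lista_up + lista_lla
def acomodar (s : List String) : List String :=
  let p := s.foldl (fun (acc : List String × List String) palabra =>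
    let acc := if palabra == "UP" then (acc.1 ++ ["UP"], acc.2) else acc
    if palabra == "LLA" then (acc.1, acc.2 ++ ["LLA"]) else acc) ([], [])
  p.1 ++ p.2

-- ===== PORT B =====
-- Python's boolean sort key (p == "LLA") is ported as 0/1 over Nat: False < True in Python is 0 < 1, exact.
def acomodar_alt (s : List String) : List String :=
  let relevantes := s.filter (fun p => p == "UP" || p == "LLA")
  PySem.List.sorted relevantes (fun p => if p == "LLA" then (1 : Nat) else 0) false

-- ===== PRECONDITION & SPEC =====
def Spec_acomodar (s : List String) (out : List String) : Prop := out = acomodar_alt s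
instance (s : List String) (out : List String) : Decidable (Spec_acomodar s out) := by unfold Spec_acomodar; infer_instance

-- ===== CLAIM (what is proved, stated in full; the proofs are below) =====
def Claim_equal_acomodar : Prop := ∀ (s : List String), Dom_acomodar s → Spec_acomodar s (acomodar s)

-- ===== LEMMAS AND PROOFS =====

-- A's fold accumulates exactly (replicate #UP, replicate #LLA)
theorem acomodar_foldl_inv (s : List String) (u l : List String) :
    s.foldl (fun (acc : List String × List String) palabra =>
      let acc := if palabra == "UP" then (acc.1 ++ ["UP"], acc.2) else acc
      if palabra == "LLA" then (acc.1, acc.2 ++ ["LLA"]) else acc) (u, l)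
    = (u ++ List.replicate (s.count "UP") "UP", l ++ List.replicate (s.count "LLA") "LLA") := by
  induction s generalizing u l with
  | nil => simp
  | cons x xs ih =>
    simp only [List.foldl_cons]
    by_cases hu : x = "UP" <;> by_cases hl : x = "LLA" <;>
      simp_all [List.replicate_succ, List.append_assoc]

-- the sort key and comparator of B's port
def pvKey (p : String) : Nat := if p == "LLA" then 1 else 0
def pvBefore (a b : String) : Bool := decide (pvKey a < pvKey b)

theorem insertBy_up (u l : Nat) :
    PySem.List.insertBy pvBefore "UP" (List.replicate u "UP" ++ List.replicate l "LLA")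
    = List.replicate (u + 1) "UP" ++ List.replicate l "LLA" := by
  induction u with
  | zero =>
    cases l with
    | zero => simp [PySem.List.insertBy]
    | succ m => simp [PySem.List.insertBy, List.replicate_succ, pvBefore, pvKey]
  | succ n ih =>
    simp only [List.replicate_succ, List.cons_append, PySem.List.insertBy]
    have : pvBefore "UP" "UP" = false := by decide
    rw [this]
    simp only [Bool.false_eq_true, if_false]
    rw [show (PySem.List.insertBy pvBefore "UP" (List.replicate n "UP" ++ List.replicate l "LLA")) = _ from ih]
    simp [List.replicate_succ]

theorem insertBy_lla (u l : Nat) :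
    PySem.List.insertBy pvBefore "LLA" (List.replicate u "UP" ++ List.replicate l "LLA")
    = List.replicate u "UP" ++ List.replicate (l + 1) "LLA" := by
  have h : ∀ y ∈ List.replicate u "UP" ++ List.replicate l "LLA", pvBefore "LLA" y = false := by
    intro y hy
    rcases List.mem_append.1 hy with h' | h' <;>
      simp_all [List.eq_of_mem_replicate h', pvBefore, pvKey]
  rw [PySem.List.insertBy_of_forall_not_before _ _ _ h]
  simp [List.replicate_succ', List.append_assoc]

-- the insertion-sort fold over a list of only "UP"/"LLA" words, from a canonical accumulator
theorem foldl_insertBy_inv (t : List String)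
    (ht : ∀ x ∈ t, x = "UP" ∨ x = "LLA") (u l : Nat) :
    t.foldl (fun acc x => PySem.List.insertBy pvBefore x acc)
      (List.replicate u "UP" ++ List.replicate l "LLA")
    = List.replicate (u + t.count "UP") "UP" ++ List.replicate (l + t.count "LLA") "LLA" := by
  induction t generalizing u l with
  | nil => simp
  | cons x xs ih =>
    have hx := ht x (by simp)
    have hxs : ∀ y ∈ xs, y = "UP" ∨ y = "LLA" := fun y hy => ht y (by simp [hy])
    simp only [List.foldl_cons]
    rcases hx with h | h <;> subst h
    · rw [insertBy_up, ih hxs]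
      simp
      omega
    · rw [insertBy_lla, ih hxs]
      simp
      omega

theorem count_filter_rel (s : List String) (a : String) (ha : (a == "UP" || a == "LLA") = true) :
    (s.filter (fun p => p == "UP" || p == "LLA")).count a = s.count a := by
  simp [List.count_filter, ha]

-- B's port computes replicate #UP ++ replicate #LLA
theorem acomodar_alt_eq (s : List String) :
    acomodar_alt s = List.replicate (s.count "UP") "UP" ++ List.replicate (s.count "LLA") "LLA" := by
  unfold acomodar_alt
  have hmem : ∀ x ∈ s.filter (fun p => p == "UP" || p == "LLA"), x = "UP" ∨ x = "LLA" := by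
    intro x hx
    have := List.of_mem_filter hx
    simpa using this
  have hb : (fun a b : String => decide ((if a == "LLA" then (1:Nat) else 0) < (if b == "LLA" then (1:Nat) else 0))) = pvBefore := by
    funext a b; simp [pvBefore, pvKey]
  show PySem.List.sorted _ _ false = _
  rw [PySem.List.sorted_eq_foldl_insertBy]
  simp only [hb]
  have := foldl_insertBy_inv _ hmem 0 0
  simp only [List.replicate_zero, List.append_nil, Nat.zero_add] at this
  rw [this, count_filter_rel s "UP" (by decide), count_filter_rel s "LLA" (by decide)]

-- ===== VERDICT (by name: the statement is the Claim_ definition above) =====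
theorem acomodar_spec : Claim_equal_acomodar := by
  intro s _
  show acomodar s = acomodar_alt s
  rw [acomodar_alt_eq]
  simp only [acomodar]
  rw [acomodar_foldl_inv]
  simp
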